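-- pv_equiv track=rewrite | github.com/PDBeurope/ccdutils | pdbeccdutils/pdb_ccd_mogul.py | query_ring_tors_labels
-- ===== SOURCE A (Python) =====
-- def query_ring_tors_labels(atom_ids):
--     number_atoms_in_ring = len(atom_ids)
--     query_ring_torsions_labels = []
--     for i0 in range(number_atoms_in_ring):
--         i1 = (i0 + 1) % number_atoms_in_ring
--         i2 = (i0 + 2) % number_atoms_in_ring
--         i3 = (i0 + 3) % number_atoms_in_ring
--         tors_label = '{}-{}-{}-{}'.format(atom_ids[i0], atom_ids[i1], atom_ids[i2], atom_ids[i3])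
--         query_ring_torsions_labels.append(tors_label)
--     return query_ring_torsions_labels
-- ===== SOURCE B (Python) =====
-- def query_ring_tors_labels(atom_ids):
--     n = len(atom_ids)
--     if n == 0:
--         return []
--     rots = [atom_ids[k % n:] + atom_ids[:k % n] for k in range(4)]
--     return ['{}-{}-{}-{}'.format(w, x, y, z) for w, x, y, z in zip(*rots)]
-- ===== Notes on version B (the rewrite author's own statement) =====
-- stated objective: alternative
-- what changed: B builds the four cyclically rotated columns once (slice-concat rotations) and zips them into rows, instead of computing three modular indices and doing four indexed lookups inside the loop.
import Mathlib
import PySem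

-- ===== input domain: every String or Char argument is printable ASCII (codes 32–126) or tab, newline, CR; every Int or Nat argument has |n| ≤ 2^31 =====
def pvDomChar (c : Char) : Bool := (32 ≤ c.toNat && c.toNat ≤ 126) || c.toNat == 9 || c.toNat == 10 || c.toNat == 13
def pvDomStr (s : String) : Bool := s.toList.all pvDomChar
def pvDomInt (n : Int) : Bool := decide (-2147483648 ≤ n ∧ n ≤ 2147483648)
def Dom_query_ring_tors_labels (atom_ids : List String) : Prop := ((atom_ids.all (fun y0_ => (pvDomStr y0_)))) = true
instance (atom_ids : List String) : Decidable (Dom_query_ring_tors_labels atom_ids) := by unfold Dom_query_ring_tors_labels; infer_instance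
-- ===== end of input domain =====

-- B builds the four cyclically rotated columns once and zips them into rows,
-- instead of computing modular indices inside the loop; same cost, different decomposition.

-- ===== PORT A =====
def query_ring_tors_labels (atom_ids : List String) : List String :=
  let n : Int := atom_ids.length
  (PySem.List.pyRange 0 n 1).foldl (fun acc i0 =>
    let i1 := PySem.Int.mod (i0 + 1) n
    let i2 := PySem.Int.mod (i0 + 2) n
    let i3 := PySem.Int.mod (i0 + 3) n
    let tors_label := PySem.Str.join "-"
      [PySem.List.pyGetD atom_ids i0 "", PySem.List.pyGetD atom_ids i1 "",
       PySem.List.pyGetD atom_ids i2 "", PySem.List.pyGetD atom_ids i3 ""]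
    acc ++ [tors_label]) []

-- ===== PORT B =====
-- atom_ids[j:] + atom_ids[:j]
def pvRot (xs : List String) (j : Nat) : List String := xs.drop j ++ xs.take j

-- the zip-of-four comprehension
def pvZip4 : List String → List String → List String → List String → List String
  | w :: ws, x :: xs, y :: ys, z :: zs =>
      PySem.Str.join "-" [w, x, y, z] :: pvZip4 ws xs ys zs
  | _, _, _, _ => []

def query_ring_tors_labels_alt (atom_ids : List String) : List String :=
  let n := atom_ids.length
  if n = 0 then []
  else
    pvZip4 (pvRot atom_ids (0 % n)) (pvRot atom_ids (1 % n))
           (pvRot atom_ids (2 % n)) (pvRot atom_ids (3 % n))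

-- ===== PRECONDITION & SPEC =====
def Spec_query_ring_tors_labels (atom_ids : List String) (out : List String) : Prop := out = query_ring_tors_labels_alt atom_ids
instance (atom_ids : List String) (out : List String) : Decidable (Spec_query_ring_tors_labels atom_ids out) := by unfold Spec_query_ring_tors_labels; infer_instance

-- ===== CLAIM (what is proved, stated in full; the proofs are below) =====
def Claim_equal_query_ring_tors_labels : Prop := ∀ (atom_ids : List String), Dom_query_ring_tors_labels atom_ids → Spec_query_ring_tors_labels atom_ids (query_ring_tors_labels atom_ids)

-- ===== LEMMAS AND PROOFS =====

theorem pvRot_length (xs : List String) (j : Nat) : (pvRot xs j).length = xs.length := by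
  simp [pvRot]; omega

theorem pvRot_getD (xs : List String) (j k : Nat) (hj : j < xs.length) (hk : k < xs.length) :
    (pvRot xs j).getD k "" = xs.getD ((k + j) % xs.length) "" := by
  rw [List.getD_eq_getElem?_getD, List.getD_eq_getElem?_getD, pvRot]
  rcases Nat.lt_or_ge k (xs.length - j) with h | h
  · rw [List.getElem?_append_left (by simp [List.length_drop]; omega), List.getElem?_drop]
    have hm : (k + j) % xs.length = j + k := by
      rw [Nat.mod_eq_of_lt (by omega), Nat.add_comm]
    rw [hm]
  · rw [List.getElem?_append_right (by simp [List.length_drop]; omega)]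
    simp only [List.length_drop]
    rw [List.getElem?_take_of_lt (by omega)]
    have hm : (k + j) % xs.length = k - (xs.length - j) := by
      rw [Nat.mod_eq_sub_mod (by omega), Nat.mod_eq_of_lt (by omega)]
      omega
    rw [hm]

theorem pvZip4_eq_map (ws xs ys zs : List String)
    (h1 : xs.length = ws.length) (h2 : ys.length = ws.length) (h3 : zs.length = ws.length) :
    pvZip4 ws xs ys zs = (List.range ws.length).map (fun k =>
      PySem.Str.join "-" [ws.getD k "", xs.getD k "", ys.getD k "", zs.getD k ""]) := by
  induction ws generalizing xs ys zs with
  | nil =>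
    rw [List.eq_nil_of_length_eq_zero h1, List.eq_nil_of_length_eq_zero h2,
        List.eq_nil_of_length_eq_zero h3]
    rfl
  | cons w ws ih =>
    cases xs with
    | nil => simp at h1
    | cons x xs =>
      cases ys with
      | nil => simp at h2
      | cons y ys =>
        cases zs with
        | nil => simp at h3
        | cons z zs =>
          simp only [List.length_cons, Nat.add_right_cancel_iff] at h1 h2 h3
          rw [pvZip4, ih xs ys zs h1 h2 h3]
          simp [List.range_succ_eq_map, List.map_map, Function.comp_def]

theorem a_eq_map (atom_ids : List String) :
    query_ring_tors_labels atom_ids = (List.range atom_ids.length).map (fun k =>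
      PySem.Str.join "-"
        [atom_ids.getD k "", atom_ids.getD ((k + 1) % atom_ids.length) "",
         atom_ids.getD ((k + 2) % atom_ids.length) "", atom_ids.getD ((k + 3) % atom_ids.length) ""]) := by
  unfold query_ring_tors_labels
  rw [PySem.List.foldl_append_singleton_eq_map, PySem.List.pyRange_zero_natCast, List.map_map,
      List.nil_append]
  apply List.map_congr_left
  intro k _
  simp only [Function.comp_def]
  have c1 : ((k : Int) + 1) = ((k + 1 : Nat) : Int) := by push_cast; ring
  have c2 : ((k : Int) + 2) = ((k + 2 : Nat) : Int) := by push_cast; ring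
  have c3 : ((k : Int) + 3) = ((k + 3 : Nat) : Int) := by push_cast; ring
  rw [c1, c2, c3, PySem.Int.mod_natCast, PySem.Int.mod_natCast, PySem.Int.mod_natCast,
      PySem.List.pyGetD_natCast, PySem.List.pyGetD_natCast, PySem.List.pyGetD_natCast,
      PySem.List.pyGetD_natCast]

-- ===== VERDICT (by name: the statement is the Claim_ definition above) =====
theorem query_ring_tors_labels_spec : Claim_equal_query_ring_tors_labels := by
  intro atom_ids _
  unfold Spec_query_ring_tors_labels
  rcases Nat.eq_zero_or_pos atom_ids.length with h0 | hpos
  · simp [query_ring_tors_labels_alt, h0, a_eq_map]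
  · rw [a_eq_map, query_ring_tors_labels_alt]
    rw [if_neg (Nat.pos_iff_ne_zero.mp hpos)]
    rw [pvZip4_eq_map _ _ _ _ (by simp [pvRot_length]) (by simp [pvRot_length]) (by simp [pvRot_length])]
    rw [pvRot_length]
    apply List.map_congr_left
    intro k hk
    have hk' : k < atom_ids.length := List.mem_range.mp hk
    rw [pvRot_getD _ _ _ (Nat.mod_lt _ hpos) hk', pvRot_getD _ _ _ (Nat.mod_lt _ hpos) hk',
        pvRot_getD _ _ _ (Nat.mod_lt _ hpos) hk', pvRot_getD _ _ _ (Nat.mod_lt _ hpos) hk']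
    have key : ∀ c : Nat, (k + c % atom_ids.length) % atom_ids.length = (k + c) % atom_ids.length := by
      intro c
      conv_lhs => rw [Nat.add_mod, Nat.mod_mod]
      conv_rhs => rw [Nat.add_mod]
    have e0 : (k + 0 % atom_ids.length) % atom_ids.length = k := by
      rw [key 0, Nat.add_zero, Nat.mod_eq_of_lt hk']
    rw [e0, key 1, key 2, key 3]
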